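-- pv_equiv track=rewrite | github.com/Srinivas-Undapalli/networkx | agentic_clustering.py | _analyze_overall_system_impact
-- ===== SOURCE A (Python) =====
-- from typing import Dict, List, Optional, Any, TypedDict, Tuple
--
-- def _analyze_overall_system_impact(investigations: List[Dict]) -> Dict:
--     """Analyze overall system impact across all patterns"""
--     system_impact = {
--         'CJCM': {'frequency': 0, 'severity': 0},
--         'CASSANDRA': {'frequency': 0, 'severity': 0},
--         'Product': {'frequency': 0, 'severity': 0},
--         'Billing': {'frequency': 0, 'severity': 0}
--     }
--
--     # Aggregate impact across investigations
--     for inv in investigations: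
--         # Simplified impact calculation
--         for system in system_impact:
--             system_impact[system]['frequency'] += 1
--             system_impact[system]['severity'] += 2  # Placeholder
--
--     # Calculate overall scores
--     for system in system_impact:
--         impact = system_impact[system]
--         impact['overall_score'] = impact['frequency'] * impact['severity']
--
--     return system_impact
-- ===== SOURCE B (Python) =====
-- def _analyze_overall_system_impact(investigations):
--     """Closed form: every system gets frequency=n, severity=2n, overall=2n^2."""
--     n = len(investigations)
--     return {system: {'frequency': n, 'severity': 2 * n, 'overall_score': 2 * n * n}
--             for system in ('CJCM', 'CASSANDRA', 'Product', 'Billing')}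
-- ===== Notes on version B (the rewrite author's own statement) =====
-- stated objective: simpler
-- what changed: Replaced A's loop over investigations (which never reads its elements) and the two mutation passes over the dict by the closed form frequency=n, severity=2n, overall_score=2n^2, built once for the four fixed systems.
import Mathlib
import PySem

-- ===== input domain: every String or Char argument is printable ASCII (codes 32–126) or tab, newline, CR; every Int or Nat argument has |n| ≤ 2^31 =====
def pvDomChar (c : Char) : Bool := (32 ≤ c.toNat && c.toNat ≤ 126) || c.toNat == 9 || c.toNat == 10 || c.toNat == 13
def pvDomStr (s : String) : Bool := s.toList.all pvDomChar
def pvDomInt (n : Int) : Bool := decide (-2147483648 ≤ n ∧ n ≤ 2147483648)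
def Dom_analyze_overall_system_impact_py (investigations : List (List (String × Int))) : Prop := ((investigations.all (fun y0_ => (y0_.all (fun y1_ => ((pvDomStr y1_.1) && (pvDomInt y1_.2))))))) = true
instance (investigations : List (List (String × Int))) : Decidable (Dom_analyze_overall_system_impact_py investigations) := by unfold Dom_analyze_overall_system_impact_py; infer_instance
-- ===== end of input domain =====

-- B replaces A's per-investigation loop (which never reads its elements) by the closed form n, 2n, 2n^2 (objective: simpler).

-- ===== PORT A =====
-- dicts as insertion-ordered association lists with unique keys (the type convention).
-- pvUpd m k f = in-place update of the value at key k (keys in A are always present, so this is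
-- exactly Python's `m[k] = f(m[k])`; exact here because every key accessed exists).
def pvUpd {α : Type} (m : List (String × α)) (key : String) (f : α → α) : List (String × α) :=
  match m with
  | [] => []
  | (k, v) :: rest => if k == key then (k, f v) :: rest else (k, v) :: pvUpd rest key f

-- pvGet m k = m[k] (key always present in A; 0 never used)
def pvGet (m : List (String × Int)) (key : String) : Int :=
  match m with
  | [] => 0
  | (k, v) :: rest => if k == key then v else pvGet rest key

-- pvSet m k v = m[k] = v (overwrite in place, new keys append — Python dict assignment)
def pvSet (m : List (String × Int)) (key : String) (v : Int) : List (String × Int) :=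
  match m with
  | [] => [(key, v)]
  | (k, w) :: rest => if k == key then (k, v) :: rest else (k, w) :: pvSet rest key v

-- body of A's `for inv in investigations` loop: for each key `system`, frequency += 1, severity += 2
def pvAStep (d : List (String × List (String × Int))) : List (String × List (String × Int)) :=
  (d.map Prod.fst).foldl (fun d system =>
    pvUpd (pvUpd d system (fun m => pvUpd m "frequency" (· + 1)))
      system (fun m => pvUpd m "severity" (· + 2))) d

def analyze_overall_system_impact_py (investigations : List (List (String × Int))) : List (String × List (String × Int)) :=
  let system_impact : List (String × List (String × Int)) :=
    [("CJCM", [("frequency", 0), ("severity", 0)]),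
     ("CASSANDRA", [("frequency", 0), ("severity", 0)]),
     ("Product", [("frequency", 0), ("severity", 0)]),
     ("Billing", [("frequency", 0), ("severity", 0)])]
  let system_impact := investigations.foldl (fun d _inv => pvAStep d) system_impact
  (system_impact.map Prod.fst).foldl (fun d system =>
    pvUpd d system (fun impact =>
      pvSet impact "overall_score" (pvGet impact "frequency" * pvGet impact "severity"))) system_impact

-- ===== PORT B =====
def analyze_overall_system_impact_py_alt (investigations : List (List (String × Int))) : List (String × List (String × Int)) :=
  let n : Int := investigations.length
  let row : List (String × Int) := [("frequency", n), ("severity", 2 * n), ("overall_score", 2 * n * n)]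
  [("CJCM", row), ("CASSANDRA", row), ("Product", row), ("Billing", row)]

-- ===== PRECONDITION & SPEC =====
def Spec_analyze_overall_system_impact_py (investigations : List (List (String × Int))) (out : List (String × List (String × Int))) : Prop := out = analyze_overall_system_impact_py_alt investigations
instance (investigations : List (List (String × Int))) (out : List (String × List (String × Int))) : Decidable (Spec_analyze_overall_system_impact_py investigations out) := by unfold Spec_analyze_overall_system_impact_py; infer_instance

-- ===== CLAIM (what is proved, stated in full; the proofs are below) =====
def Claim_equal_analyze_overall_system_impact_py : Prop := ∀ (investigations : List (List (String × Int))), Dom_analyze_overall_system_impact_py investigations → Spec_analyze_overall_system_impact_py investigations (analyze_overall_system_impact_py investigations)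

-- ===== LEMMAS AND PROOFS =====

-- the values of 'frequency'/'severity' after k loop iterations, in the exact shape the loop builds
def pvFreq : Nat → Int
  | 0 => 0
  | k + 1 => pvFreq k + 1

def pvSev : Nat → Int
  | 0 => 0
  | k + 1 => pvSev k + 2

lemma pvFreq_eq (k : Nat) : pvFreq k = (k : Int) := by
  induction k with
  | zero => rfl
  | succ k ih => simp [pvFreq, ih]

lemma pvSev_eq (k : Nat) : pvSev k = 2 * (k : Int) := by
  induction k with
  | zero => rfl
  | succ k ih => simp [pvSev, ih]; ring

-- the dict state after k iterations of A's aggregation loop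
def pvState (k : Nat) : List (String × List (String × Int)) :=
  [("CJCM", [("frequency", pvFreq k), ("severity", pvSev k)]),
   ("CASSANDRA", [("frequency", pvFreq k), ("severity", pvSev k)]),
   ("Product", [("frequency", pvFreq k), ("severity", pvSev k)]),
   ("Billing", [("frequency", pvFreq k), ("severity", pvSev k)])]

lemma pvAStep_state (k : Nat) : pvAStep (pvState k) = pvState (k + 1) := rfl

lemma pvLoop_state (l : List (List (String × Int))) (k : Nat) :
    l.foldl (fun d _inv => pvAStep d) (pvState k) = pvState (k + l.length) := by
  induction l generalizing k with
  | nil => rfl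
  | cons x xs ih =>
      rw [List.foldl_cons, pvAStep_state, ih, List.length_cons]
      congr 1
      omega

-- the overall-score loop evaluated on pvState k
lemma pvFinal_state (k : Nat) :
    ((pvState k).map Prod.fst).foldl (fun d system =>
      pvUpd d system (fun impact =>
        pvSet impact "overall_score" (pvGet impact "frequency" * pvGet impact "severity"))) (pvState k) =
      [("CJCM", [("frequency", pvFreq k), ("severity", pvSev k), ("overall_score", pvFreq k * pvSev k)]),
       ("CASSANDRA", [("frequency", pvFreq k), ("severity", pvSev k), ("overall_score", pvFreq k * pvSev k)]),
       ("Product", [("frequency", pvFreq k), ("severity", pvSev k), ("overall_score", pvFreq k * pvSev k)]),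
       ("Billing", [("frequency", pvFreq k), ("severity", pvSev k), ("overall_score", pvFreq k * pvSev k)])] := rfl

-- ===== VERDICT (by name: the statement is the Claim_ definition above) =====
theorem analyze_overall_system_impact_py_spec : Claim_equal_analyze_overall_system_impact_py := by
  intro investigations _
  show _ = _
  unfold analyze_overall_system_impact_py
  have h0 : ([("CJCM", [("frequency", (0:Int)), ("severity", 0)]),
      ("CASSANDRA", [("frequency", 0), ("severity", 0)]),
      ("Product", [("frequency", 0), ("severity", 0)]),
      ("Billing", [("frequency", 0), ("severity", 0)])] : List (String × List (String × Int))) = pvState 0 := rfl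
  simp only [h0]
  rw [pvLoop_state, Nat.zero_add, pvFinal_state]
  simp [analyze_overall_system_impact_py_alt, pvFreq_eq, pvSev_eq]
  ring
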